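-- pv_equiv track=rewrite | github.com/DanilTsygolnik/psp | parse_input.py | search_alive_in_string
-- ===== SOURCE A (Python) =====
-- def search_alive_in_string(string_num, string):
--     alive_cells_ids = []
--     char_num = 1
--     for char in string:
--         if char == "*":
--             new_id = "".join(["h", str(string_num), "w", str(char_num)])
--             alive_cells_ids.append(new_id)
--         char_num += 1
--     return alive_cells_ids
-- ===== SOURCE B (Python) =====
-- def search_alive_in_string(string_num, string):
--     alive_cells_ids = []
--     pos = string.find('*')
--     while pos != -1:
--         alive_cells_ids.append('h' + str(string_num) + 'w' + str(pos + 1))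
--         pos = string.find('*', pos + 1)
--     return alive_cells_ids
-- ===== Notes on version B (the rewrite author's own statement) =====
-- stated objective: faster
-- what changed: Replaces the per-character Python loop with a counter and an equality branch by a while-loop that jumps from star to star with the C-level str.find, so Python-level work is proportional to the number of '*' rather than the string length.
import Mathlib
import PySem

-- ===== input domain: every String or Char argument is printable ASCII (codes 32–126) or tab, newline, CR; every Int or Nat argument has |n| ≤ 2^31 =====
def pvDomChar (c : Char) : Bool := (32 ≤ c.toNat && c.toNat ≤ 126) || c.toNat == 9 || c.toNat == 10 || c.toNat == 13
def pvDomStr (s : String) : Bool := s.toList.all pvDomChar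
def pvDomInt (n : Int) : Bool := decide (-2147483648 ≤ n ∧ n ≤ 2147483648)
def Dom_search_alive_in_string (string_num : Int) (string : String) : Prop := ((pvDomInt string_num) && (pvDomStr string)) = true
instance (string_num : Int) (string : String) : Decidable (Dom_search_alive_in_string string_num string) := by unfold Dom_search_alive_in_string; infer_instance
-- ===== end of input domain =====

-- B replaces A's per-character loop-and-branch by a while-loop that jumps from '*' to '*' via str.find (same O(n), measurably faster by a constant factor: C-level search instead of a Python-level branch per character).

-- ===== PORT A =====
-- A's for-loop: accumulate ids, char_num counts from 1.
def pvALoop (string_num : Int) (cs : List Char) (acc : List String) (char_num : Int) : List String :=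
  match cs with
  | [] => acc
  | c :: rest =>
    if c = '*' then
      pvALoop string_num rest (acc ++ ["h" ++ PySem.Int.toStr string_num ++ "w" ++ PySem.Int.toStr char_num]) (char_num + 1)
    else
      pvALoop string_num rest acc (char_num + 1)

def search_alive_in_string (string_num : Int) (string : String) : List String :=
  pvALoop string_num string.toList [] 1

-- ===== PORT B =====
-- string.find('*', i) on the suffix cs starting at absolute index i:
-- returns the absolute index of the next '*' and the suffix after it, or none.
def pvFindStar (cs : List Char) (i : Nat) : Option (Nat × List Char) :=
  match cs with
  | [] => none
  | c :: rest => if c = '*' then some (i, rest) else pvFindStar rest (i + 1)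

theorem pvFindStar_shrink (cs : List Char) (i p : Nat) (rest : List Char)
    (h : pvFindStar cs i = some (p, rest)) : rest.length < cs.length := by
  induction cs generalizing i with
  | nil => simp [pvFindStar] at h
  | cons c cs ih =>
    simp only [pvFindStar] at h
    split at h
    · cases h; simp
    · exact Nat.lt_trans (ih _ h) (by simp)

-- B's while-loop, driven by the current find result: pos = find('*', pos+1) each round.
def pvBLoop (string_num : Int) (o : Option (Nat × List Char)) : List String :=
  match o with
  | none => []
  | some (p, rest) =>
    ("h" ++ PySem.Int.toStr string_num ++ "w" ++ PySem.Int.toStr ((p : Int) + 1))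
      :: pvBLoop string_num (pvFindStar rest (p + 1))
termination_by o.elim 0 (fun x => x.2.length + 1)
decreasing_by
  cases hf : pvFindStar rest (p + 1) with
  | none => simp
  | some q => simpa using pvFindStar_shrink _ _ _ _ hf

def search_alive_in_string_alt (string_num : Int) (string : String) : List String :=
  pvBLoop string_num (pvFindStar string.toList 0)

-- ===== PRECONDITION & SPEC =====
def Spec_search_alive_in_string (string_num : Int) (string : String) (out : List String) : Prop := out = search_alive_in_string_alt string_num string
instance (string_num : Int) (string : String) (out : List String) : Decidable (Spec_search_alive_in_string string_num string out) := by unfold Spec_search_alive_in_string; infer_instance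

-- ===== CLAIM (what is proved, stated in full; the proofs are below) =====
def Claim_equal_search_alive_in_string : Prop := ∀ (string_num : Int) (string : String), Dom_search_alive_in_string string_num string → Spec_search_alive_in_string string_num string (search_alive_in_string string_num string)

-- ===== LEMMAS AND PROOFS =====
theorem pvFindStar_skip (c : Char) (cs : List Char) (i : Nat) (hc : ¬ c = '*') :
    pvFindStar (c :: cs) i = pvFindStar cs (i + 1) := by
  simp [pvFindStar, hc]

theorem pvBLoop_some (string_num : Int) (p : Nat) (rest : List Char) :
    pvBLoop string_num (some (p, rest)) =
      ("h" ++ PySem.Int.toStr string_num ++ "w" ++ PySem.Int.toStr ((p : Int) + 1))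
        :: pvBLoop string_num (pvFindStar rest (p + 1)) := by
  rw [pvBLoop]

theorem pvLoop_eq (string_num : Int) (cs : List Char) :
    ∀ (i : Nat) (acc : List String),
      pvALoop string_num cs acc ((i : Int) + 1) = acc ++ pvBLoop string_num (pvFindStar cs i) := by
  induction cs with
  | nil => intro i acc; simp [pvALoop, pvFindStar, pvBLoop]
  | cons c cs ih =>
    intro i acc
    by_cases hc : c = '*'
    · subst hc
      rw [show pvFindStar ('*' :: cs) i = some (i, cs) by simp [pvFindStar], pvBLoop_some]
      simp only [pvALoop, reduceIte]
      have := ih (i + 1) (acc ++ ["h" ++ PySem.Int.toStr string_num ++ "w" ++ PySem.Int.toStr ((i : Int) + 1)])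
      push_cast at this ⊢
      simpa using this
    · rw [pvFindStar_skip c cs i hc]
      simp only [pvALoop, if_neg hc]
      have := ih (i + 1) acc
      push_cast at this ⊢
      simpa using this

-- ===== VERDICT (by name: the statement is the Claim_ definition above) =====
theorem search_alive_in_string_spec : Claim_equal_search_alive_in_string := by
  intro string_num string _
  unfold Spec_search_alive_in_string search_alive_in_string search_alive_in_string_alt
  simpa using pvLoop_eq string_num string.toList 0 []
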